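-- pv_equiv track=rewrite | github.com/Ayaanfaisaall/Bio-Agent-1.0 | validator/pubmed_validator.py | validate_pubmed_structured
-- ===== SOURCE A (Python) =====
-- import string
--
-- def validate_pubmed_structured(articles, gene, aliases, topic, year):
--     """
--     Soft Validation: Checks for keywords but returns a list of warnings
--     instead of blocking the process.
--     """
--     missing_criteria = []
--
--     # Clean topic: Remove punctuation and split into significant words
--     translator = str.maketrans('', '', string.punctuation)
--     clean_topic = topic.translate(translator).lower()
--     # Filter out small stop words
--     topic_words = [w for w in clean_topic.split() if len(w) > 3]
--
--     genes_to_check = [g.lower() for g in [gene] + aliases if g != "NONE"]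
--
--     gene_found = False
--     topic_found = False
--     year_found = False
--
--     for art in articles:
--         # Combine title and abstract for search
--         text = (art["title"] + " " + art["abstract"]).lower()
--
--         # 1. Flexible Gene Check
--         if gene != "NONE":
--             # Check if any gene alias exists in the text
--             if any(g in text for g in genes_to_check):
--                 gene_found = True
--         else:
--             gene_found = True
--
--         # 2. Flexible Topic Check
--         if not topic_words or any(w in text for w in topic_words):
--             topic_found = True
--
--         # 3. Year Check
--         if year:
--             if str(year) in str(art["year"]):
--                 year_found = True
--         else:
--             year_found = True
--
--     # Compile warnings instead of blocking
--     if gene != "NONE" and not gene_found: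
--         missing_criteria.append(f"Gene '{gene}' or aliases not explicitly mentioned.")
--
--     if not topic_found and topic_words:
--         missing_criteria.append(f"Topic keywords '{topic}' not explicitly found.")
--
--     if year and not year_found:
--         missing_criteria.append(f"Publication Year '{year}' not found.")
--
--     return missing_criteria
-- ===== SOURCE B (Python) =====
-- import string
--
-- def validate_pubmed_structured(articles, gene, aliases, topic, year):
--     # Worklist algorithm: build a list of unmet criteria (message + per-article
--     # test); scan the articles, deleting each criterion as soon as one article
--     # satisfies it, and stop scanning once the worklist is empty.  Whatever
--     # criteria survive the scan are exactly the warnings.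
--     table = str.maketrans('', '', string.punctuation)
--     topic_words = [w for w in topic.translate(table).lower().split() if len(w) > 3]
--     genes = [g.lower() for g in [gene] + aliases if g != "NONE"]
--
--     pending = []
--     if gene != "NONE":
--         pending.append((f"Gene '{gene}' or aliases not explicitly mentioned.",
--                         lambda text, art: any(g in text for g in genes)))
--     if topic_words:
--         pending.append((f"Topic keywords '{topic}' not explicitly found.",
--                         lambda text, art: any(w in text for w in topic_words)))
--     if year:
--         pending.append((f"Publication Year '{year}' not found.",
--                         lambda text, art: str(year) in str(art["year"])))
--
--     for art in articles:
--         if not pending: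
--             break
--         text = (art["title"] + " " + art["abstract"]).lower()
--         pending = [(m, t) for (m, t) in pending if not t(text, art)]
--
--     return [m for m, _ in pending]
-- ===== Notes on version B (the rewrite author's own statement) =====
-- stated objective: alternative
-- what changed: Replaces A's full scan that accumulates three boolean flags and then tests them against append conditions with a worklist algorithm: the unmet criteria are materialised up front as (message, test) pairs, each criterion is deleted from the worklist as soon as an article satisfies it, the scan stops early once the worklist is empty, and the surviving worklist IS the returned warning list.
import Mathlib
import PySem

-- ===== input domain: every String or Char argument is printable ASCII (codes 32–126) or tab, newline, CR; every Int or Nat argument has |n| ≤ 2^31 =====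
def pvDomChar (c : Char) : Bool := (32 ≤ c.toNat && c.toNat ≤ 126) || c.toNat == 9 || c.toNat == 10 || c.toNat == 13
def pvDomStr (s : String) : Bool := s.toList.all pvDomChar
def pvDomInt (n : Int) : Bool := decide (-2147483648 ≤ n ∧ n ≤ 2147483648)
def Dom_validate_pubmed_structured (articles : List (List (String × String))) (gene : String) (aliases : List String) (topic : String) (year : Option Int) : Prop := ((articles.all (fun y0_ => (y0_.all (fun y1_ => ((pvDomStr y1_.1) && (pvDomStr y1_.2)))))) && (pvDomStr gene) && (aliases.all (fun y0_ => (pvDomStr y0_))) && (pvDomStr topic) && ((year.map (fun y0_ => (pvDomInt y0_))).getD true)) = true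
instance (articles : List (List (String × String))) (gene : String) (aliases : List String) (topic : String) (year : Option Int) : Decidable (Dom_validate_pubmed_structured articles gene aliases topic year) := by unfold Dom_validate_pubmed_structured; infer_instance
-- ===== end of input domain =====

-- B replaces A's flag-accumulating full scan with a worklist: the unmet criteria are built
-- up front as (message, test) pairs, deleted from the worklist as soon as an article
-- satisfies them (stopping early when the worklist empties), and the survivors are returned.

-- shared preprocessing helpers (both Pythons compute these identical values up front)
-- string.punctuation
def pvPunct : List Char := "!\"#$%&'()*+,-./:;<=>?@[\\]^_`{|}~".toList

-- topic.translate(str.maketrans('', '', string.punctuation)).lower().split(), words of len > 3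
def pvTopicWords (topic : String) : List (List Char) :=
  (PySem.Chars.split₀ (PySem.Chars.lower (topic.toList.filter (fun c => !(pvPunct.contains c))))).filter
    (fun w => decide (3 < w.length))

-- [g.lower() for g in [gene] + aliases if g != "NONE"]
def pvGenes (gene : String) (aliases : List String) : List (List Char) :=
  ((gene :: aliases).filter (fun g => g != "NONE")).map (fun g => PySem.Chars.lower g.toList)

-- (art["title"] + " " + art["abstract"]).lower(), on char lists (exact: toList of ++ is ++ of toLists);
-- the dict lookups use default "" — Pre_ guarantees the keys are present (Python raises KeyError otherwise)
def pvText (art : List (String × String)) : List Char :=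
  PySem.Chars.lower ((PySem.Dict.getD (PySem.Dict.mk art) "title" "").toList ++ ' ' :: (PySem.Dict.getD (PySem.Dict.mk art) "abstract" "").toList)

-- Python truthiness of `year` (None and 0 are falsy)
def pvYearT (year : Option Int) : Bool := match year with | some y => decide (y ≠ 0) | none => false

-- ===== PORT A =====
def validate_pubmed_structured (articles : List (List (String × String))) (gene : String) (aliases : List String) (topic : String) (year : Option Int) : List String :=
  let topicWords := pvTopicWords topic
  let genesToCheck := pvGenes gene aliases
  let st := articles.foldl (fun (s : Bool × Bool × Bool) art =>
      let text := pvText art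
      let gf := if gene != "NONE" then
          (if genesToCheck.any (fun g => PySem.Chars.isIn g text) then true else s.1)
        else true
      let tf := if topicWords.isEmpty || topicWords.any (fun w => PySem.Chars.isIn w text) then true else s.2.1
      let yf := if pvYearT year then
          (if PySem.Str.isIn (PySem.Int.toStr (year.getD 0)) (PySem.Dict.getD (PySem.Dict.mk art) "year" "") then true else s.2.2)
        else true
      (gf, tf, yf)) (false, false, false)
  let m : List String := []
  let m := if gene != "NONE" && !st.1 then m ++ ["Gene '" ++ gene ++ "' or aliases not explicitly mentioned."] else m
  let m := if !st.2.1 && !topicWords.isEmpty then m ++ ["Topic keywords '" ++ topic ++ "' not explicitly found."] else m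
  let m := if pvYearT year && !st.2.2 then m ++ ["Publication Year '" ++ PySem.Int.toStr (year.getD 0) ++ "' not found."] else m
  m

-- ===== PORT B =====
-- the initial worklist of unmet criteria: (message, per-article test)
def pvCrit (gene : String) (aliases : List String) (topic : String) (year : Option Int) :
    List (String × (List Char → List (String × String) → Bool)) :=
  let topicWords := pvTopicWords topic
  let genes := pvGenes gene aliases
  (if gene != "NONE" then
      [("Gene '" ++ gene ++ "' or aliases not explicitly mentioned.",
        fun text _ => genes.any (fun g => PySem.Chars.isIn g text))] else []) ++
  (if !topicWords.isEmpty then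
      [("Topic keywords '" ++ topic ++ "' not explicitly found.",
        fun text _ => topicWords.any (fun w => PySem.Chars.isIn w text))] else []) ++
  (if pvYearT year then
      [("Publication Year '" ++ PySem.Int.toStr (year.getD 0) ++ "' not found.",
        fun _ art => PySem.Str.isIn (PySem.Int.toStr (year.getD 0)) (PySem.Dict.getD (PySem.Dict.mk art) "year" ""))] else [])

-- the scan loop: drop satisfied criteria per article, early-break when the worklist is empty
def pvScan : List (List (String × String)) → List (String × (List Char → List (String × String) → Bool)) → List (String × (List Char → List (String × String) → Bool))
  | [], p => p
  | a :: rest, p => if p.isEmpty then p else pvScan rest (p.filter (fun c => !(c.2 (pvText a) a)))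

def validate_pubmed_structured_alt (articles : List (List (String × String))) (gene : String) (aliases : List String) (topic : String) (year : Option Int) : List String :=
  (pvScan articles (pvCrit gene aliases topic year)).map Prod.fst

-- ===== PRECONDITION & SPEC =====
-- Pre_ excludes exactly the inputs where Python A raises KeyError: an article missing "title" or
-- "abstract", or (when year is truthy) missing "year".
def Pre_validate_pubmed_structured (articles : List (List (String × String))) (gene : String) (aliases : List String) (topic : String) (year : Option Int) : Prop :=
  (∀ art ∈ articles, PySem.Dict.contains (PySem.Dict.mk art) "title" = true ∧ PySem.Dict.contains (PySem.Dict.mk art) "abstract" = true) ∧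
  (pvYearT year = true → ∀ art ∈ articles, PySem.Dict.contains (PySem.Dict.mk art) "year" = true)
instance (articles : List (List (String × String))) (gene : String) (aliases : List String) (topic : String) (year : Option Int) : Decidable (Pre_validate_pubmed_structured articles gene aliases topic year) := by unfold Pre_validate_pubmed_structured; infer_instance

def pvWitness_validate_pubmed_structured : (List (List (String × String))) × String × List String × String × Option Int :=
  ([[("title", "BRCA1 study"), ("abstract", "cancer growth"), ("year", "2020")]], "BRCA1", ["brca"], "cancer growth", some 2020)

def Spec_validate_pubmed_structured (articles : List (List (String × String))) (gene : String) (aliases : List String) (topic : String) (year : Option Int) (out : List String) : Prop := out = validate_pubmed_structured_alt articles gene aliases topic year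
instance (articles : List (List (String × String))) (gene : String) (aliases : List String) (topic : String) (year : Option Int) (out : List String) : Decidable (Spec_validate_pubmed_structured articles gene aliases topic year out) := by unfold Spec_validate_pubmed_structured; infer_instance

-- ===== CLAIM (what is proved, stated in full; the proofs are below) =====
def Claim_equal_validate_pubmed_structured : Prop := ∀ (articles : List (List (String × String))) (gene : String) (aliases : List String) (topic : String) (year : Option Int), Dom_validate_pubmed_structured articles gene aliases topic year → Pre_validate_pubmed_structured articles gene aliases topic year → Spec_validate_pubmed_structured articles gene aliases topic year (validate_pubmed_structured articles gene aliases topic year)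

-- ===== LEMMAS AND PROOFS =====

-- the worklist scan keeps exactly the criteria no article satisfies (the early break is sound:
-- filtering an empty worklist is the identity)
theorem pvScan_eq (l : List (List (String × String))) :
    ∀ p, pvScan l p = p.filter (fun c => !(l.any (fun a => c.2 (pvText a) a))) := by
  induction l with
  | nil => intro p; simp [pvScan]
  | cons a rest ih =>
    intro p
    simp only [pvScan]
    by_cases hp : p = []
    · subst hp; simp
    · rw [if_neg (by simpa using hp), ih, List.filter_filter]
      congr 1
      funext c
      simp [List.any_cons, Bool.not_or]
      rw [Bool.and_comm]

-- each component of A's three-flag fold is "initial flag OR some article satisfies the test",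
-- provided its update has the shape `if p art then true else old`
theorem pvFold_fst {α : Type} (p : α → Bool) (f2 f3 : (Bool × Bool × Bool) → α → Bool) :
    ∀ (l : List α) (s : Bool × Bool × Bool),
      (l.foldl (fun s a => ((if p a then true else s.1), f2 s a, f3 s a)) s).1 = (s.1 || l.any p) := by
  intro l
  induction l with
  | nil => intro s; simp
  | cons a t ih =>
    intro s
    simp only [List.foldl_cons, List.any_cons, ih]
    cases p a <;> simp

theorem pvFold_snd1 {α : Type} (p : α → Bool) (f1 f3 : (Bool × Bool × Bool) → α → Bool) :
    ∀ (l : List α) (s : Bool × Bool × Bool),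
      (l.foldl (fun s a => (f1 s a, (if p a then true else s.2.1), f3 s a)) s).2.1 = (s.2.1 || l.any p) := by
  intro l
  induction l with
  | nil => intro s; simp
  | cons a t ih =>
    intro s
    simp only [List.foldl_cons, List.any_cons, ih]
    cases p a <;> simp

theorem pvFold_snd2 {α : Type} (p : α → Bool) (f1 f2 : (Bool × Bool × Bool) → α → Bool) :
    ∀ (l : List α) (s : Bool × Bool × Bool),
      (l.foldl (fun s a => (f1 s a, f2 s a, (if p a then true else s.2.2))) s).2.2 = (s.2.2 || l.any p) := by
  intro l
  induction l with
  | nil => intro s; simp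
  | cons a t ih =>
    intro s
    simp only [List.foldl_cons, List.any_cons, ih]
    cases p a <;> simp

-- a singleton worklist segment filtered and projected reduces to a conditional message
theorem pvSeg {F : Type} (c : Prop) [Decidable c] (x : String × F) (p : String × F → Bool) :
    (((if c then [x] else []).filter p).map Prod.fst) = if c then (if p x then [x.1] else []) else [] := by
  by_cases h : c
  · simp only [if_pos h]; cases hp : p x <;> simp [List.filter, hp]
  · simp [if_neg h]

-- a conditional append at the tail is an appended conditional segment
theorem pvAppIf {α : Type} (c : Prop) [Decidable c] (m l : List α) :
    (if c then m ++ l else m) = m ++ (if c then l else []) := by split_ifs <;> simp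

-- ===== VERDICT (by name: the statement is the Claim_ definition above) =====
theorem validate_pubmed_structured_spec : Claim_equal_validate_pubmed_structured := by
  intro articles gene aliases topic year _ _
  unfold Spec_validate_pubmed_structured validate_pubmed_structured validate_pubmed_structured_alt pvCrit
  rw [pvScan_eq]
  simp only [List.filter_append, List.map_append, pvSeg, pvAppIf, List.nil_append]
  simp only [List.append_assoc]
  by_cases hg : gene = "NONE"
  · have hg' : (gene != "NONE") = false := by simp [hg]
    simp only [hg', Bool.false_eq_true, if_false, Bool.false_and, List.nil_append]
    cases hy : pvYearT year
    · simp only [Bool.false_eq_true, if_false, Bool.false_and, List.append_nil]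
      by_cases ht : pvTopicWords topic = []
      · simp [ht]
      · have ht' : (pvTopicWords topic).isEmpty = false := by simp [ht]
        simp only [ht', Bool.false_or]
        rw [pvFold_snd1]
        simp
    · simp only [if_true, Bool.true_and]
      by_cases ht : pvTopicWords topic = []
      · simp only [ht, List.isEmpty_nil, Bool.true_or, if_true]
        rw [pvFold_snd2]
        simp
      · have ht' : (pvTopicWords topic).isEmpty = false := by simp [ht]
        simp only [ht', Bool.false_or]
        rw [pvFold_snd1, pvFold_snd2]
        simp
  · have hg' : (gene != "NONE") = true := by simp [hg]
    simp only [hg', if_true, Bool.true_and]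
    cases hy : pvYearT year
    · simp only [Bool.false_eq_true, if_false, Bool.false_and, List.append_nil]
      by_cases ht : pvTopicWords topic = []
      · simp only [ht, List.isEmpty_nil, Bool.true_or, if_true]
        rw [pvFold_fst]
        simp
      · have ht' : (pvTopicWords topic).isEmpty = false := by simp [ht]
        simp only [ht', Bool.false_or]
        rw [pvFold_fst, pvFold_snd1]
        simp
    · simp only [if_true, Bool.true_and]
      by_cases ht : pvTopicWords topic = []
      · simp only [ht, List.isEmpty_nil, Bool.true_or, if_true]
        rw [pvFold_fst, pvFold_snd2]
        simp
      · have ht' : (pvTopicWords topic).isEmpty = false := by simp [ht]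
        simp only [ht', Bool.false_or]
        rw [pvFold_fst, pvFold_snd1, pvFold_snd2]
        simp
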